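-- pv_equiv track=rewrite | github.com/Schaffhausen-Institute-of-Technology/ride-sharing-simulator | script/split_files.py | split_files
-- ===== SOURCE A (Python) =====
-- def split_files(csv_reader, c_indexes, h_indexes, r_indexes):
--         c_rides_rows = []
--         h_rides_rows = []
--         r_rides_rows = []
--         for ride_row in csv_reader:
--             c_ride_row = []
--             h_ride_row = []
--             r_ride_row = []
--
--             for idx in c_indexes:
--                 c_ride_row.append(ride_row[idx-1])
--             for idx in h_indexes:
--                 h_ride_row.append(ride_row[idx-1])
--             for idx in r_indexes:
--                 r_ride_row.append(ride_row[idx-1])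
--
--             c_rides_rows.append(c_ride_row)
--             h_rides_rows.append(h_ride_row)
--             r_rides_rows.append(r_ride_row)
--
--         return (c_rides_rows, h_rides_rows, r_rides_rows)
-- ===== SOURCE B (Python) =====
-- def split_files(csv_reader, c_indexes, h_indexes, r_indexes):
--     rows = list(csv_reader)
--
--     def group(indexes):
--         # column-major: extract each requested column across all rows,
--         # then transpose the columns back into per-row records
--         cols = [[row[i - 1] for row in rows] for i in indexes]
--         if not cols:
--             return [[] for _ in rows]
--         return [list(t) for t in zip(*cols)]
--
--     return (group(c_indexes), group(h_indexes), group(r_indexes))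
-- ===== Notes on version B (the rewrite author's own statement) =====
-- stated objective: alternative
-- what changed: B traverses the data column-major: for each index group it first extracts whole columns across all rows and then transposes them back into per-row records with zip(*cols), instead of A's row-major single pass appending to three per-row accumulators.
import Mathlib
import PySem

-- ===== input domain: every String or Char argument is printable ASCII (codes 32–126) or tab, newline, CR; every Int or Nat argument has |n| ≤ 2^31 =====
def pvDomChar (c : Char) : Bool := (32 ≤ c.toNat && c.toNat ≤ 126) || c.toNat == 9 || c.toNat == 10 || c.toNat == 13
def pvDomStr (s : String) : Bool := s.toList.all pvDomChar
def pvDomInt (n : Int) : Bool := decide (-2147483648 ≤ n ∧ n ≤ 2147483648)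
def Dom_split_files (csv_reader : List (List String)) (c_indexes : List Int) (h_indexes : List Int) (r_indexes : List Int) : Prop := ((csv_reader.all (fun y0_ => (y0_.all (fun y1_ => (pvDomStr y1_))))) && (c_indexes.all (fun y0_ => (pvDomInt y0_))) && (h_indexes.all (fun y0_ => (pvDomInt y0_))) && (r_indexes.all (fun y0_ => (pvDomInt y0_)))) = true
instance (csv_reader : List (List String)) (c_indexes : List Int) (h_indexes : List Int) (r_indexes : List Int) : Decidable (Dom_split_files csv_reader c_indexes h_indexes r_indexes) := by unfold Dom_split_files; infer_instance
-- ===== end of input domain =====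

-- B traverses the data column-major (extract each requested column, then transpose with
-- zip(*cols)) instead of A's row-major single pass with three accumulators (alternative; same cost).


-- ===== PORT A =====
-- inner loop: for idx in indexes: acc.append(ride_row[idx-1]); pyGet? is exact Python
-- indexing (negative from the end, none = IndexError); Pre_ excludes the none case,
-- outside of which the .getD "" default is never reached.
def pvRowLoop (ride_row : List String) (indexes : List Int) : List String :=
  indexes.foldl (fun acc idx => acc ++ [(PySem.List.pyGet? ride_row (idx - 1)).getD ""]) []

def split_files (csv_reader : List (List String)) (c_indexes : List Int) (h_indexes : List Int) (r_indexes : List Int) : List (List String) × List (List String) × List (List String) :=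
  csv_reader.foldl
    (fun (st : List (List String) × List (List String) × List (List String)) ride_row =>
      (st.1 ++ [pvRowLoop ride_row c_indexes],
       st.2.1 ++ [pvRowLoop ride_row h_indexes],
       st.2.2 ++ [pvRowLoop ride_row r_indexes]))
    ([], [], [])

-- ===== PORT B =====
-- column [row[i-1] for row in rows]
def pvColumn (rows : List (List String)) (i : Int) : List String :=
  rows.map (fun row => (PySem.List.pyGet? row (i - 1)).getD "")

-- group(indexes): extract the columns, then [list(t) for t in zip(*cols)]
-- (zip(*cols) = the first min-length entries taken across all columns; empty cols → n rows of [])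
def pvGroup (rows : List (List String)) (indexes : List Int) : List (List String) :=
  match indexes.map (pvColumn rows) with
  | [] => rows.map (fun _ => [])
  | c0 :: rest =>
      let n := rest.foldl (fun m c => min m c.length) c0.length
      (List.range n).map (fun j => (c0 :: rest).map (fun col => col.getD j ""))

def split_files_alt (csv_reader : List (List String)) (c_indexes : List Int) (h_indexes : List Int) (r_indexes : List Int) : List (List String) × List (List String) × List (List String) :=
  (pvGroup csv_reader c_indexes, pvGroup csv_reader h_indexes, pvGroup csv_reader r_indexes)

-- ===== PRECONDITION & SPEC =====
-- Pre_ excludes exactly the inputs where Python A raises IndexError: some idx-1 out of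
-- Python range for some row.
def Pre_split_files (csv_reader : List (List String)) (c_indexes : List Int) (h_indexes : List Int) (r_indexes : List Int) : Prop :=
  ∀ row ∈ csv_reader, ∀ idx ∈ c_indexes ++ h_indexes ++ r_indexes,
    PySem.Raise.InRange row.length (idx - 1)
instance (csv_reader : List (List String)) (c_indexes : List Int) (h_indexes : List Int) (r_indexes : List Int) : Decidable (Pre_split_files csv_reader c_indexes h_indexes r_indexes) := by unfold Pre_split_files; infer_instance

def pvWitness_split_files : List (List String) × List Int × List Int × List Int :=
  ([["a", "b", "c"], ["d", "e", "f"]], [1, 2], [3], [-1, 2])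

def Spec_split_files (csv_reader : List (List String)) (c_indexes : List Int) (h_indexes : List Int) (r_indexes : List Int) (out : List (List String) × List (List String) × List (List String)) : Prop := out = split_files_alt csv_reader c_indexes h_indexes r_indexes
instance (csv_reader : List (List String)) (c_indexes : List Int) (h_indexes : List Int) (r_indexes : List Int) (out : List (List String) × List (List String) × List (List String)) : Decidable (Spec_split_files csv_reader c_indexes h_indexes r_indexes out) := by unfold Spec_split_files; infer_instance

-- ===== CLAIM (what is proved, stated in full; the proofs are below) =====
def Claim_equal_split_files : Prop := ∀ (csv_reader : List (List String)) (c_indexes : List Int) (h_indexes : List Int) (r_indexes : List Int), Dom_split_files csv_reader c_indexes h_indexes r_indexes → Pre_split_files csv_reader c_indexes h_indexes r_indexes → Spec_split_files csv_reader c_indexes h_indexes r_indexes (split_files csv_reader c_indexes h_indexes r_indexes)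

-- ===== LEMMAS AND PROOFS =====
-- the common row-major description both sides are reduced to
def pvPick (indexes : List Int) (row : List String) : List String :=
  indexes.map (fun i => (PySem.List.pyGet? row (i - 1)).getD "")

theorem pvTriFold (rows : List (List String)) (f g h : List String → List String)
    (a b c : List (List String)) :
    rows.foldl (fun st row => (st.1 ++ [f row], st.2.1 ++ [g row], st.2.2 ++ [h row])) (a, b, c)
      = (a ++ rows.map f, b ++ rows.map g, c ++ rows.map h) := by
  induction rows generalizing a b c with
  | nil => simp
  | cons row rows ih => simp [ih]

theorem pvRowLoop_eq_pick (row : List String) (indexes : List Int) :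
    pvRowLoop row indexes = pvPick indexes row := by
  unfold pvRowLoop pvPick
  simpa using PySem.List.foldl_append_singleton_eq_map
    (fun i => (PySem.List.pyGet? row (i - 1)).getD "") indexes ([] : List String)

-- every column has length rows.length, so the zip length is rows.length
theorem pvFoldMin (rest : List (List String)) (L : Nat)
    (hrest : ∀ c ∈ rest, c.length = L) :
    rest.foldl (fun m c => min m c.length) L = L := by
  induction rest with
  | nil => rfl
  | cons c cs ih =>
      have hc : c.length = L := hrest c (by simp)
      simp only [List.foldl_cons, hc, min_self]
      exact ih (fun d hd => hrest d (by simp [hd]))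

theorem pvGroup_eq_map_pick (rows : List (List String)) (indexes : List Int) :
    pvGroup rows indexes = rows.map (pvPick indexes) := by
  unfold pvGroup
  cases hidx : indexes with
  | nil =>
      show List.map (fun _ => ([] : List String)) rows = List.map (pvPick []) rows
      exact List.map_congr_left (fun row _ => by simp [pvPick])
  | cons i0 is =>
      simp only [List.map_cons]
      have hlen : ∀ c ∈ is.map (pvColumn rows), c.length = rows.length := by
        intro c hc
        obtain ⟨i, _, rfl⟩ := List.mem_map.mp hc
        simp [pvColumn]
      have hn : (is.map (pvColumn rows)).foldl (fun m c => min m c.length)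
          (pvColumn rows i0).length = rows.length := by
        have h0 : (pvColumn rows i0).length = rows.length := by simp [pvColumn]
        rw [h0]; exact pvFoldMin _ _ hlen
      simp only [hn]
      apply List.ext_getElem
      · simp
      · intro j h1 h2
        simp only [List.getElem_map, List.getElem_range]
        have hj : j < rows.length := by simpa using h1
        have hcol : ∀ i : Int, (pvColumn rows i)[j]?
            = some ((PySem.List.pyGet? rows[j] (i - 1)).getD "") := by
          intro i
          rw [List.getElem?_eq_getElem (by simp [pvColumn, hj])]
          simp [pvColumn]
        simp [hcol, pvPick]

theorem split_files_eq (csv_reader : List (List String)) (c_indexes h_indexes r_indexes : List Int) :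
    split_files csv_reader c_indexes h_indexes r_indexes
      = split_files_alt csv_reader c_indexes h_indexes r_indexes := by
  unfold split_files split_files_alt
  simp only [pvGroup_eq_map_pick]
  have := pvTriFold csv_reader (fun row => pvRowLoop row c_indexes)
    (fun row => pvRowLoop row h_indexes) (fun row => pvRowLoop row r_indexes) [] [] []
  simpa [pvRowLoop_eq_pick] using this

-- ===== VERDICT (by name: the statement is the Claim_ definition above) =====
theorem split_files_spec : Claim_equal_split_files := by
  intro csv_reader c h r _ _
  unfold Spec_split_files
  exact split_files_eq csv_reader c h r
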